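-- pv_equiv track=rewrite | github.com/AvanaPY/DV2627-Project | course/course_section.py | split_at_section_one
-- ===== SOURCE A (Python) =====
-- from typing import List, Tuple
--
-- def split_at_section_one(texts : List[str]) -> Tuple[List[str], List[str]]:
--     before : List[str] = []
--     after : List[str] = []
--     found_line : bool = False
--     for line in texts:
--         if line.startswith('1.'):
--             found_line = True
--
--         if not found_line:
--             before.append(line)
--         else:
--             after.append(line)
--
--     return (before, after)
-- ===== SOURCE B (Python) =====
-- from typing import List, Tuple
--
-- def split_at_section_one(texts : List[str]) -> Tuple[List[str], List[str]]:
--     idx = next((i for i, l in enumerate(texts) if l.startswith('1.')), len(texts))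
--     return (texts[:idx], texts[idx:])
-- ===== Notes on version B (the rewrite author's own statement) =====
-- stated objective: simpler
-- what changed: Replaced the flag-plus-branch per-element append loop with a single boundary search (index of the first line starting with '1.') followed by two slices.
import Mathlib
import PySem

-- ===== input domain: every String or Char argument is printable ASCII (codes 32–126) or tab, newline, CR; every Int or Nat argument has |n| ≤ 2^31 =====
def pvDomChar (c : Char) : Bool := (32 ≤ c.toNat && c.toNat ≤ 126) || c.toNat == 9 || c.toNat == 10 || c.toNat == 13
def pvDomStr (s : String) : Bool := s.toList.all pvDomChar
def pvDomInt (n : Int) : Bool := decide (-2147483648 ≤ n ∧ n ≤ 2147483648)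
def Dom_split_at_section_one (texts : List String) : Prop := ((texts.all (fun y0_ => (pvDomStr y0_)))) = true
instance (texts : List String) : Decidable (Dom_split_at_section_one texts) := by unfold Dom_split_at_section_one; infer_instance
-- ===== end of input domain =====

-- B replaces A's flag-plus-branch append loop by a boundary search then two slices (simpler decomposition, same cost).
-- ===== PORT A =====
-- the for-loop of A: state (before, after, found_line), branches in A's order
def pvSplitLoopA : List String → List String → List String → Bool → List String × List String
  | [], before, after, _ => (before, after)
  | line :: rest, before, after, found =>
    let found' := if PySem.Str.startswith line "1." then true else found
    if found' = false then pvSplitLoopA rest (before ++ [line]) after found'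
    else pvSplitLoopA rest before (after ++ [line]) found'

def split_at_section_one (texts : List String) : List String × List String :=
  pvSplitLoopA texts [] [] false

-- ===== PORT B =====
-- next((i for i, l in enumerate(texts) if l.startswith('1.')), len(texts))
def pvFirstIdxB : List String → Nat
  | [] => 0
  | l :: rest => if PySem.Str.startswith l "1." then 0 else pvFirstIdxB rest + 1

-- texts[:idx] / texts[idx:] with 0 ≤ idx ≤ len texts are exactly take/drop
def split_at_section_one_alt (texts : List String) : List String × List String :=
  (texts.take (pvFirstIdxB texts), texts.drop (pvFirstIdxB texts))

-- ===== PRECONDITION & SPEC =====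
def Spec_split_at_section_one (texts : List String) (out : List String × List String) : Prop := out = split_at_section_one_alt texts
instance (texts : List String) (out : List String × List String) : Decidable (Spec_split_at_section_one texts out) := by unfold Spec_split_at_section_one; infer_instance

-- ===== CLAIM (what is proved, stated in full; the proofs are below) =====
def Claim_equal_split_at_section_one : Prop := ∀ (texts : List String), Dom_split_at_section_one texts → Spec_split_at_section_one texts (split_at_section_one texts)

-- ===== LEMMAS AND PROOFS =====

lemma pvSplitLoopA_found (texts : List String) : ∀ before after,
    pvSplitLoopA texts before after true = (before, after ++ texts) := by
  induction texts with
  | nil => simp [pvSplitLoopA]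
  | cons l rest ih =>
    intro before after
    simp [pvSplitLoopA, ih]

lemma pvSplitLoopA_search (texts : List String) : ∀ before,
    pvSplitLoopA texts before [] false =
      (before ++ texts.take (pvFirstIdxB texts), texts.drop (pvFirstIdxB texts)) := by
  induction texts with
  | nil => simp [pvSplitLoopA, pvFirstIdxB]
  | cons l rest ih =>
    intro before
    by_cases h : PySem.Chars.startswith l.toList ['1', '.'] = true
    · simp [pvSplitLoopA, pvFirstIdxB, h, pvSplitLoopA_found]
    · simp [pvSplitLoopA, pvFirstIdxB, h, ih]

-- ===== VERDICT (by name: the statement is the Claim_ definition above) =====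
theorem split_at_section_one_spec : Claim_equal_split_at_section_one := by
  intro texts _
  show _ = _
  simp [split_at_section_one, split_at_section_one_alt, pvSplitLoopA_search]
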